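-- pv_equiv track=rewrite | github.com/C24-S60348/ularular | sampleapi/models/ular.py | getstepsdice
-- ===== SOURCE A (Python) =====
-- maxbox = 28
--
-- def getstepsdice(before=0, dice=3, maxbox=maxbox):
--     results = []
--
--     step = before
--     move = "forward"
--
--     for i in range(0,dice):
--         if step >= maxbox:
--             move = "backward"
--
--         if move == "forward":
--             step += 1
--         else:
--             step -= 1
--
--         results.append(step)
--
--
--     return results
-- ===== SOURCE B (Python) =====
-- def getstepsdice(before=0, dice=3, maxbox=28):
--     n = max(dice, 0)
--     forward = list(range(before + 1, min(maxbox + 1, before + 1 + n)))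
--     top = max(before, maxbox)
--     k = n - len(forward)
--     backward = list(range(top - 1, top - 1 - k, -1))
--     return forward + backward
-- ===== Notes on version B (the rewrite author's own statement) =====
-- stated objective: faster
-- what changed: Replaced the per-step flag simulation with a closed-form construction: an ascending range before+1..maxbox truncated to max(dice,0) elements, followed by a descending range starting at max(before,maxbox)-1 for the remaining count.
import Mathlib
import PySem

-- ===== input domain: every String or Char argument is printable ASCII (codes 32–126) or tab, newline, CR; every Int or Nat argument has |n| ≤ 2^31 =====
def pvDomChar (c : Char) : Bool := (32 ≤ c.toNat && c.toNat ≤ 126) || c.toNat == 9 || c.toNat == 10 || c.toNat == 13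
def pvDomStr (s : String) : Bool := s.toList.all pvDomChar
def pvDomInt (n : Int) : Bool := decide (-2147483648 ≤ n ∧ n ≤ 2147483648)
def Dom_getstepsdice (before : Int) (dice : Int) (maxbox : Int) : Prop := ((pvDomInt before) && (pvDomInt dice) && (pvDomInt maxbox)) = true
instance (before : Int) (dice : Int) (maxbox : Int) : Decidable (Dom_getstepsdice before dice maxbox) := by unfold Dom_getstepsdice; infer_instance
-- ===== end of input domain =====

-- B replaces A's step-by-step flag simulation by two concatenated range segments (ascending then descending); same values, a different decomposition.

-- ===== PORT A =====
-- body of A's for-loop: update move, update step, append step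
def stepA (maxbox : Int) (st : List Int × Int × String) : List Int × Int × String :=
  let results := st.1
  let step := st.2.1
  let move := st.2.2
  let move := if step ≥ maxbox then "backward" else move
  let step := if move = "forward" then step + 1 else step - 1
  (results ++ [step], step, move)

def getstepsdice (before : Int) (dice : Int) (maxbox : Int) : List Int :=
  -- results = []; step = before; move = "forward"; for i in range(0, dice): stepA
  let r := (PySem.List.pyRange 0 dice 1).foldl (fun st _i => stepA maxbox st)
    (([] : List Int), before, "forward")
  r.1

-- ===== PORT B =====
def getstepsdice_alt (before : Int) (dice : Int) (maxbox : Int) : List Int :=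
  let n := max dice 0
  let forward := PySem.List.pyRange (before + 1) (min (maxbox + 1) (before + 1 + n)) 1
  let top := max before maxbox
  let k := n - (forward.length : Int)
  let backward := PySem.List.pyRange (top - 1) (top - 1 - k) (-1)
  forward ++ backward

-- ===== PRECONDITION & SPEC =====
def Spec_getstepsdice (before : Int) (dice : Int) (maxbox : Int) (out : List Int) : Prop := out = getstepsdice_alt before dice maxbox
instance (before : Int) (dice : Int) (maxbox : Int) (out : List Int) : Decidable (Spec_getstepsdice before dice maxbox out) := by unfold Spec_getstepsdice; infer_instance

-- ===== CLAIM (what is proved, stated in full; the proofs are below) =====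
def Claim_equal_getstepsdice : Prop := ∀ (before : Int) (dice : Int) (maxbox : Int), Dom_getstepsdice before dice maxbox → Spec_getstepsdice before dice maxbox (getstepsdice before dice maxbox)

-- ===== LEMMAS AND PROOFS =====

-- list-producing recursion equivalent to iterating stepA (f = "is the move still forward")
def simA (maxbox : Int) : Nat → Int → Bool → List Int
  | 0, _, _ => []
  | n + 1, s, f =>
    let f' := f && !(decide (s ≥ maxbox))
    let s' := if f' then s + 1 else s - 1
    s' :: simA maxbox n s' f'

theorem foldA (maxbox : Int) : ∀ (l : List Int) (res : List Int) (s : Int) (m : String),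
    ((l.foldl (fun st _i => stepA maxbox st) (res, s, m)).1) = res ++ simA maxbox l.length s (decide (m = "forward")) := by
  intro l
  induction l with
  | nil => intro res s m; simp [simA]
  | cons a t ih =>
    intro res s m
    rw [List.foldl_cons]
    by_cases h : s ≥ maxbox
    · have hst : stepA maxbox (res, s, m) = (res ++ [s - 1], s - 1, "backward") := by
        simp [stepA, h]
      rw [hst, ih]
      simp [simA, h]
    · by_cases hm : m = "forward"
      · subst hm
        have hst : stepA maxbox (res, s, "forward") = (res ++ [s + 1], s + 1, "forward") := by
          simp [stepA, h]
        rw [hst, ih]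
        simp [simA, h]
      · have hst : stepA maxbox (res, s, m) = (res ++ [s - 1], s - 1, m) := by
          simp [stepA, h, hm]
        rw [hst, ih]
        simp [simA, h, hm]

theorem simA_false (maxbox : Int) : ∀ (n : Nat) (s : Int),
    simA maxbox n s false = PySem.List.pyRange (s - 1) (s - 1 - n) (-1) := by
  intro n
  induction n with
  | zero => intro s; simp [simA]
  | succ k ih =>
    intro s
    have lhs : simA maxbox (k + 1) s false = (s - 1) :: simA maxbox k (s - 1) false := by
      simp [simA]
    rw [lhs, ih]
    rw [show s - 1 - ((k:Nat) + 1 : Nat) = s - 1 - 1 - (k : Int) from by push_cast; ring]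
    rw [PySem.List.pyRange_neg_one_cons (by omega : s - 1 - 1 - (k : Int) < s - 1)]

theorem simA_true (maxbox : Int) : ∀ (n : Nat) (s : Int),
    simA maxbox n s true =
      (PySem.List.pyRange (s + 1) (maxbox + 1) 1).take n ++
        PySem.List.pyRange (max s maxbox - 1)
          (max s maxbox - 1 - ((n : Int) - (((PySem.List.pyRange (s + 1) (maxbox + 1) 1).take n).length : Int))) (-1) := by
  intro n
  induction n with
  | zero =>
    intro s
    simp [simA]
  | succ k ih =>
    intro s
    by_cases h : s ≥ maxbox
    · have hempty : PySem.List.pyRange (s + 1) (maxbox + 1) 1 = [] :=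
        PySem.List.pyRange_one_eq_nil (by omega)
      have hstep : simA maxbox (k + 1) s true = (s - 1) :: simA maxbox k (s - 1) false := by
        simp [simA, h]
      have hmax : max s maxbox = s := by omega
      rw [hstep, simA_false, hempty, hmax]
      simp only [List.take_nil, List.nil_append, List.length_nil, Nat.cast_zero, Int.sub_zero]
      rw [show s - 1 - ((k + 1 : Nat) : Int) = s - 1 - 1 - (k : Int) from by push_cast; ring]
      rw [PySem.List.pyRange_neg_one_cons (by omega : s - 1 - 1 - (k : Int) < s - 1)]
    · have hcons : PySem.List.pyRange (s + 1) (maxbox + 1) 1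
          = (s + 1) :: PySem.List.pyRange (s + 1 + 1) (maxbox + 1) 1 :=
        PySem.List.pyRange_one_cons (by omega)
      have hstep : simA maxbox (k + 1) s true = (s + 1) :: simA maxbox k (s + 1) true := by
        simp [simA, h]
      have hmax : max s maxbox = maxbox := by omega
      have hmax' : max (s + 1) maxbox = maxbox := by omega
      rw [hstep, ih, hcons]
      simp only [List.take_succ_cons, List.cons_append, List.length_cons, hmax, hmax']
      congr 4
      push_cast
      ring

theorem take_pyRange (a b : Int) (n : Nat) :
    (PySem.List.pyRange a b 1).take n = PySem.List.pyRange a (min b (a + n)) 1 := by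
  rw [PySem.List.pyRange_one, PySem.List.pyRange_one, ← List.map_take, List.take_range]
  congr 2
  omega

-- ===== VERDICT (by name: the statement is the Claim_ definition above) =====
theorem getstepsdice_spec : Claim_equal_getstepsdice := by
  intro before dice maxbox _
  unfold Spec_getstepsdice
  simp only [getstepsdice, getstepsdice_alt]
  rw [foldA maxbox (PySem.List.pyRange 0 dice 1) [] before "forward"]
  have hlen : (PySem.List.pyRange 0 dice 1).length = (max dice 0).toNat := by
    rw [PySem.List.length_pyRange_one]
    rcases le_total dice 0 with hdl | hdl
    · rw [max_eq_right hdl]; omega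
    · rw [max_eq_left hdl]; omega
  rw [hlen]
  have hd : (decide (("forward" : String) = "forward")) = true := by decide
  rw [hd, List.nil_append, simA_true, take_pyRange,
     Int.toNat_of_nonneg (le_max_right dice 0)]
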